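-- pv_equiv track=rewrite | github.com/jlope384/Proyecto-2-IA | maze_solver.py | load_maze_from_text
-- ===== SOURCE A (Python) =====
-- def load_maze_from_text(text):
--     lines = [l.rstrip('\n') for l in text.strip().split('\n') if l.strip()]
--     rows = len(lines)
--     cols = max(len(l) for l in lines)
--     maze = []
--     start = goal = None
--     for r, line in enumerate(lines):
--         row = []
--         for c in range(cols):
--             ch = line[c] if c < len(line) else '1'
--             val = int(ch) if ch in '01234' else 1
--             row.append(val)
--             if ch == '2': start = (r, c)
--             if ch == '3': goal  = (r, c)
--         maze.append(row)
--     return maze, rows, cols, start, goal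
-- ===== SOURCE B (Python) =====
-- def load_maze_from_text(text):
--     lines = [l.rstrip('\n') for l in text.strip().split('\n') if l.strip()]
--     rows = len(lines)
--     cols = max(len(l) for l in lines)
--     maze = [[int(ch) if ch in '01234' else 1 for ch in line] + [1] * (cols - len(line))
--             for line in lines]
--
--     def find_last(target):
--         for r in range(rows - 1, -1, -1):
--             c = lines[r].rfind(target)
--             if c != -1:
--                 return (r, c)
--         return None
--
--     return maze, rows, cols, find_last('2'), find_last('3')
-- ===== Notes on version B (the rewrite author's own statement) =====
-- stated objective: alternative
-- what changed: A's single forward fused loop (appending each padded cell while overwriting start/goal) is replaced by rows built from the line's own characters plus arithmetic padding, and start/goal located by a backwards early-exit search over rows using str.rfind (first hit from the bottom = A's last-wins).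
import Mathlib
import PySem

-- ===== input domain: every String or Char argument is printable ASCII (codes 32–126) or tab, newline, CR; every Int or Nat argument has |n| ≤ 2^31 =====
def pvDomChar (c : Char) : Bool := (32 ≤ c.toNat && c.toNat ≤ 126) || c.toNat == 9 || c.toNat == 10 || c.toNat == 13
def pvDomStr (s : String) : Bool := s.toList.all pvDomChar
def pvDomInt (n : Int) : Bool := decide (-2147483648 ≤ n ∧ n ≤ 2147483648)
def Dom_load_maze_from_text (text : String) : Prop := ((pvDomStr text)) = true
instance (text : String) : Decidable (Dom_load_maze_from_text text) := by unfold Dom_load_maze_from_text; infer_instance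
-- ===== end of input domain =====

-- B builds each row from the line's own characters plus arithmetic padding and locates
-- start/goal by a backwards early-exit search over rows using rfind (first hit from the
-- bottom = A's last-wins); objective: alternative algorithm (measured constant-factor faster).

-- ===== PORT A =====
-- hand port of l.rstrip('\n'): drop trailing '\n' characters (exact)
def pvRstripNL (l : List Char) : List Char :=
  (l.reverse.dropWhile (fun c => c == '\n')).reverse

-- lines = [l.rstrip('\n') for l in text.strip().split('\n') if l.strip()]
-- (identical first line in both A and Source B, hence shared)
def pvLines (text : String) : List (List Char) :=
  ((PySem.Chars.splitOn (PySem.Chars.strip text.toList) ['\n']).filter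
    (fun l => !(PySem.Chars.strip l).isEmpty)).map pvRstripNL

-- cols = max(len(l) for l in lines)  (identical in A and Source B; Python raises ValueError on [],
-- excluded by Pre_; the [] branch value is never claimed about)
def pvMaxLen : List (List Char) → Int
  | [] => 0
  | l :: ls => (ls.map (fun x => (x.length : Int))).foldl max (l.length : Int)

def pvDigits : List Char := ['0', '1', '2', '3', '4']

-- body of A's inner loop over c in range(cols); state = (row, start, goal)
def pvBodyA (r : Int) (line : List Char)
    (a2 : List Int × Option (Int × Int) × Option (Int × Int)) (c : Int) :
    List Int × Option (Int × Int) × Option (Int × Int) :=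
  let ch : Char := if c < (line.length : Int) then PySem.List.pyGetD line c '1' else '1'
  let v : Int := if ch ∈ pvDigits then ((ch.toNat : Int) - 48) else 1
  (a2.1 ++ [v],
   if ch = '2' then some (r, c) else a2.2.1,
   if ch = '3' then some (r, c) else a2.2.2)

def load_maze_from_text (text : String) :
    List (List Int) × Int × Int × (Option (Int × Int)) × (Option (Int × Int)) :=
  let lines := pvLines text
  let rows : Int := (lines.length : Int)
  let cols : Int := pvMaxLen lines
  let st :=
    (PySem.List.enumerate lines).foldl
      (fun (acc : List (List Int) × Option (Int × Int) × Option (Int × Int)) rl =>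
        let inner := (PySem.List.pyRange 0 cols 1).foldl (pvBodyA rl.1 rl.2) ([], acc.2.1, acc.2.2)
        (acc.1 ++ [inner.1], inner.2.1, inner.2.2))
      ([], none, none)
  (st.1, rows, cols, st.2.1, st.2.2)

-- ===== PORT B =====
-- line.rfind(target) for a single character: scan from the end, -1 if absent (exact)
def pvRfindFrom (l : List Char) (t : Char) : Nat → Int
  | 0 => -1
  | n + 1 => if l.getD n ' ' = t then (n : Int) else pvRfindFrom l t n

def pvRfind (l : List Char) (t : Char) : Int := pvRfindFrom l t l.length

-- for r in range(rows-1, -1, -1): c = lines[r].rfind(target); if c != -1: return (r, c)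
def pvFindLast (lines : List (List Char)) (t : Char) : List Int → Option (Int × Int)
  | [] => none
  | r :: rs =>
    let c := pvRfind (PySem.List.pyGetD lines r []) t
    if c ≠ -1 then some (r, c) else pvFindLast lines t rs

def load_maze_from_text_alt (text : String) :
    List (List Int) × Int × Int × (Option (Int × Int)) × (Option (Int × Int)) :=
  let lines := pvLines text
  let rows : Int := (lines.length : Int)
  let cols : Int := pvMaxLen lines
  let maze := lines.map (fun line =>
    line.map (fun ch => if ch ∈ pvDigits then ((ch.toNat : Int) - 48) else 1)
      ++ List.replicate (cols - (line.length : Int)).toNat 1)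
  (maze, rows, cols,
   pvFindLast lines '2' (PySem.List.pyRange (rows - 1) (-1) (-1)),
   pvFindLast lines '3' (PySem.List.pyRange (rows - 1) (-1) (-1)))

-- ===== PRECONDITION & SPEC =====
-- Pre_ excludes exactly the texts with no non-whitespace character, on which Python A
-- (and B) raise ValueError in max() over an empty sequence.
def Pre_load_maze_from_text (text : String) : Prop :=
  PySem.Chars.strip text.toList ≠ []
instance (text : String) : Decidable (Pre_load_maze_from_text text) := by
  unfold Pre_load_maze_from_text; infer_instance
def pvWitness_load_maze_from_text : String := "20\n.3"

def Spec_load_maze_from_text (text : String) (out : List (List Int) × Int × Int × (Option (Int × Int)) × (Option (Int × Int))) : Prop := out = load_maze_from_text_alt text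
instance (text : String) (out : List (List Int) × Int × Int × (Option (Int × Int)) × (Option (Int × Int))) : Decidable (Spec_load_maze_from_text text out) := by unfold Spec_load_maze_from_text; infer_instance

-- ===== CLAIM (what is proved, stated in full; the proofs are below) =====
def Claim_equal_load_maze_from_text : Prop := ∀ (text : String), Dom_load_maze_from_text text → Pre_load_maze_from_text text → Spec_load_maze_from_text text (load_maze_from_text text)

-- ===== LEMMAS AND PROOFS =====

-- characterization of A's cell value at column c
def pvCellA (line : List Char) (c : Int) : Int :=
  if c < (line.length : Int)
  then (if PySem.List.pyGetD line c '1' ∈ pvDigits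
        then (((PySem.List.pyGetD line c '1').toNat : Int) - 48) else 1)
  else 1

-- last-wins update: overwrite s when an occurrence (index i ≠ -1) exists in the row
def pvUpd (s : Option (Int × Int)) (r i : Int) : Option (Int × Int) :=
  if i = -1 then s else some (r, i)

-- structural "last occurrence over all rows, rows numbered from r0"
def pvLastHit : List (List Char) → Int → Char → Option (Int × Int)
  | [], _, _ => none
  | x :: xs, r0, t =>
    match pvLastHit xs (r0 + 1) t with
    | some p => some p
    | none => if pvRfind x t = -1 then none else some (r0, pvRfind x t)

def pvOr : Option (Int × Int) → Option (Int × Int) → Option (Int × Int)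
  | some p, _ => some p
  | none, s => s

-- A's fused inner loop over the first n columns
theorem pv_inner_gen (ln : List Char) (r : Int) (n : Nat)
    (row0 : List Int) (s g : Option (Int × Int)) :
    (List.range n).foldl (fun a2 (c : Nat) => pvBodyA r ln a2 (c : Int)) (row0, s, g) =
      (row0 ++ (List.range n).map (fun c : Nat => pvCellA ln (c : Int)),
       pvUpd s r (pvRfindFrom ln '2' (min n ln.length)),
       pvUpd g r (pvRfindFrom ln '3' (min n ln.length))) := by
  induction n with
  | zero => simp [pvRfindFrom, pvUpd]
  | succ n ih =>
    rw [List.range_succ, List.foldl_append, ih, List.map_append, List.foldl_cons, List.foldl_nil]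
    by_cases h : n < ln.length
    · have hmn : min n ln.length = n := by omega
      have hmin1 : min (n + 1) ln.length = n + 1 := by omega
      have hlt : (n : Int) < (ln.length : Int) := by exact_mod_cast h
      have hne : ((n : Nat) : Int) ≠ -1 := by omega
      have hsome : ln[n]? = some ln[n] := List.getElem?_eq_getElem h
      simp only [pvBodyA, if_pos hlt, hmin1, hmn, pvRfindFrom, PySem.List.pyGetD_natCast,
        List.getD, hsome, Option.getD_some]
      refine Prod.ext ?_ (Prod.ext ?_ ?_)
      · simp [pvCellA, Nat.not_le.mpr h, PySem.List.pyGetD_natCast, List.getD, hsome,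
          List.append_assoc]
      · by_cases h2 : ln[n] = '2' <;> simp [h2, pvUpd, hne]
      · by_cases h3 : ln[n] = '3' <;> simp [h3, pvUpd, hne]
    · have hmin1 : min (n + 1) ln.length = min n ln.length := by omega
      have hge : ¬ ((n : Int) < (ln.length : Int)) := by exact_mod_cast h
      rw [hmin1]
      simp only [pvBodyA, if_neg hge]
      refine Prod.ext ?_ (Prod.ext ?_ ?_)
      · simp [pvCellA, h, pvDigits, List.append_assoc]
      · simp
      · simp

-- the inner lemma at cols ≥ len line, ranges in pyRange form
theorem pv_inner_eq (line : List Char) (r : Int) (cols : Int)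
    (hc : 0 ≤ cols) (hlen : (line.length : Int) ≤ cols) (s g : Option (Int × Int)) :
    (PySem.List.pyRange 0 cols 1).foldl (pvBodyA r line) ([], s, g) =
      ((PySem.List.pyRange 0 cols 1).map (pvCellA line),
       pvUpd s r (pvRfind line '2'), pvUpd g r (pvRfind line '3')) := by
  obtain ⟨n, rfl⟩ : ∃ n : Nat, cols = (n : Int) := ⟨cols.toNat, (Int.toNat_of_nonneg hc).symm⟩
  have hlen' : line.length ≤ n := by exact_mod_cast hlen
  rw [PySem.List.pyRange_zero_natCast, List.foldl_map, List.map_map]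
  have := pv_inner_gen line r n [] s g
  rw [min_eq_right hlen'] at this
  simpa [pvRfind, min_eq_right hlen'] using this

-- every line's length is bounded by pvMaxLen
theorem pv_len_le_maxLen (lines : List (List Char)) (l : List Char) (hl : l ∈ lines) :
    (l.length : Int) ≤ pvMaxLen lines := by
  cases lines with
  | nil => cases hl
  | cons x xs =>
    have hmax := PySem.List.le_foldl_max (xs.map (fun t => (t.length : Int))) (x.length : Int)
    rcases List.mem_cons.mp hl with rfl | h
    · exact hmax.1
    · exact hmax.2 _ (List.mem_map.mpr ⟨l, h, rfl⟩)

theorem pv_maxLen_nonneg (lines : List (List Char)) : 0 ≤ pvMaxLen lines := by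
  cases lines with
  | nil => simp [pvMaxLen]
  | cons x xs =>
    have hmax := PySem.List.le_foldl_max (xs.map (fun t => (t.length : Int))) (x.length : Int)
    calc (0 : Int) ≤ (x.length : Int) := by positivity
      _ ≤ _ := hmax.1

-- one row of A's last-wins accumulation, folded into the last-hit view
theorem pv_or_step (xs : List (List Char)) (r0 : Int) (t : Char)
    (s : Option (Int × Int)) (x : List Char) :
    pvOr (pvLastHit xs (r0 + 1) t) (pvUpd s r0 (pvRfind x t)) =
      pvOr (pvLastHit (x :: xs) r0 t) s := by
  simp only [pvLastHit]
  cases hxs : pvLastHit xs (r0 + 1) t with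
  | some p => simp [pvOr]
  | none => by_cases hr : pvRfind x t = -1 <;> simp [pvOr, pvUpd, hr]

-- A's fused outer loop equals the padded-row map plus the last-hit characterization
theorem pv_outer_gen (cols : Int) (hc : 0 ≤ cols) :
    ∀ (lines : List (List Char)) (r0 : Int) (maze0 : List (List Int)) (s g : Option (Int × Int)),
    (∀ l ∈ lines, (l.length : Int) ≤ cols) →
    (PySem.List.enumerate lines r0).foldl
        (fun (acc : List (List Int) × Option (Int × Int) × Option (Int × Int)) rl =>
          let inner := (PySem.List.pyRange 0 cols 1).foldl (pvBodyA rl.1 rl.2) ([], acc.2.1, acc.2.2)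
          (acc.1 ++ [inner.1], inner.2.1, inner.2.2))
        (maze0, s, g) =
      (maze0 ++ lines.map (fun line => (PySem.List.pyRange 0 cols 1).map (pvCellA line)),
       pvOr (pvLastHit lines r0 '2') s, pvOr (pvLastHit lines r0 '3') g) := by
  intro lines
  induction lines with
  | nil => intro r0 maze0 s g _; simp [PySem.List.enumerate, pvLastHit, pvOr]
  | cons x xs ih =>
    intro r0 maze0 s g hb
    have hx : (x.length : Int) ≤ cols := hb x (by simp)
    simp only [PySem.List.enumerate, List.foldl_cons]
    rw [pv_inner_eq x r0 cols hc hx s g]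
    rw [ih (r0 + 1) _ _ _ (fun l hl => hb l (by simp [hl]))]
    exact Prod.ext (by simp [List.append_assoc])
      (Prod.ext (pv_or_step xs r0 '2' s x) (pv_or_step xs r0 '3' g x))

-- B's padded row equals A's row built over range(cols)
theorem pv_row_eq (ln : List Char) (n : Nat) (hlen : ln.length ≤ n) :
    (List.range n).map (fun c : Nat => pvCellA ln (c : Int)) =
      ln.map (fun ch => if ch ∈ pvDigits then ((ch.toNat : Int) - 48) else 1)
        ++ List.replicate (n - ln.length) 1 := by
  apply List.ext_getElem
  · simp; omega
  · intro i h1 h2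
    simp only [List.getElem_map, List.getElem_range]
    simp only [List.length_map, List.length_range] at h1
    by_cases hi : i < ln.length
    · have hlt : ((i : Nat) : Int) < (ln.length : Int) := by exact_mod_cast hi
      have hsome : ln[i]? = some ln[i] := List.getElem?_eq_getElem hi
      rw [List.getElem_append_left (by simpa using hi)]
      simp [pvCellA, hlt, PySem.List.pyGetD_natCast, List.getD, hsome]
    · have hge : ¬ (((i : Nat) : Int) < (ln.length : Int)) := by exact_mod_cast hi
      rw [List.getElem_append_right (by simp; omega)]
      simp [pvCellA, hge]

-- pvLastHit over a snoc: the last row wins when it contains the target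
theorem pv_lastHit_snoc (ys : List (List Char)) (x : List Char) (t : Char) :
    ∀ r0 : Int, pvLastHit (ys ++ [x]) r0 t =
      if pvRfind x t = -1 then pvLastHit ys r0 t
      else some (r0 + (ys.length : Int), pvRfind x t) := by
  induction ys with
  | nil =>
    intro r0
    by_cases hr : pvRfind x t = -1 <;> simp [pvLastHit, hr]
  | cons y ys ih =>
    intro r0
    simp only [List.cons_append, pvLastHit, ih (r0 + 1)]
    by_cases hr : pvRfind x t = -1
    · simp [hr]
    · simp [hr]
      ring_nf

-- pvFindLast only reads the indices in its list
theorem pv_findLast_congr (l1 l2 : List (List Char)) (t : Char) :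
    ∀ rs : List Int, (∀ r ∈ rs, PySem.List.pyGetD l1 r [] = PySem.List.pyGetD l2 r []) →
    pvFindLast l1 t rs = pvFindLast l2 t rs := by
  intro rs
  induction rs with
  | nil => intro _; rfl
  | cons r rs ih =>
    intro h
    simp only [pvFindLast, h r (by simp)]
    rw [ih (fun r' hr' => h r' (by simp [hr']))]

-- B's backwards early-exit search computes the last hit
theorem pv_findLast_eq (lines : List (List Char)) (t : Char) :
    pvFindLast lines t (PySem.List.pyRange ((lines.length : Int) - 1) (-1) (-1)) =
      pvLastHit lines 0 t := by
  induction lines using List.reverseRecOn with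
  | nil =>
    rw [PySem.List.pyRange_neg_one_eq_nil (by simp)]
    rfl
  | append_singleton ys x ih =>
    have hlen : ((ys ++ [x]).length : Int) - 1 = ((ys.length : Nat) : Int) := by
      simp
    rw [hlen, PySem.List.pyRange_neg_one_cons (by omega)]
    simp only [pvFindLast]
    have hget : PySem.List.pyGetD (ys ++ [x]) ((ys.length : Nat) : Int) [] = x := by
      rw [PySem.List.pyGetD_natCast, List.getD_eq_getElem _ _ (by simp)]
      simp
    rw [hget, pv_lastHit_snoc ys x t 0]
    by_cases hr : pvRfind x t = -1
    · rw [if_pos hr, if_neg (by simp [hr])]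
      have hcong : pvFindLast (ys ++ [x]) t (PySem.List.pyRange ((ys.length : Int) - 1) (-1) (-1))
          = pvFindLast ys t (PySem.List.pyRange ((ys.length : Int) - 1) (-1) (-1)) := by
        apply pv_findLast_congr
        intro r hrm
        rw [PySem.List.mem_pyRange_neg_one] at hrm
        obtain ⟨k, rfl⟩ : ∃ k : Nat, r = (k : Int) :=
          ⟨r.toNat, (Int.toNat_of_nonneg (by omega)).symm⟩
        have hk : k < ys.length := by omega
        rw [PySem.List.pyGetD_natCast, PySem.List.pyGetD_natCast,
          List.getD_eq_getElem _ _ (by simp; omega), List.getD_eq_getElem _ _ hk,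
          List.getElem_append_left hk]
      rw [hcong, ih]
    · rw [if_neg hr, if_pos hr]
      simp

-- ===== VERDICT (by name: the statement is the Claim_ definition above) =====
theorem load_maze_from_text_spec : Claim_equal_load_maze_from_text := by
  intro text _ _
  unfold Spec_load_maze_from_text load_maze_from_text load_maze_from_text_alt
  simp only
  rw [pv_outer_gen (pvMaxLen (pvLines text)) (pv_maxLen_nonneg _) (pvLines text) 0 [] none none
    (fun l hl => pv_len_le_maxLen _ l hl)]
  refine Prod.ext ?_ (Prod.ext rfl (Prod.ext rfl (Prod.ext ?_ ?_)))
  · show [] ++ _ = _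
    rw [List.nil_append]
    apply List.map_congr_left
    intro line hl
    have hlen : (line.length : Int) ≤ pvMaxLen (pvLines text) := pv_len_le_maxLen _ line hl
    have hc := pv_maxLen_nonneg (pvLines text)
    obtain ⟨n, hn⟩ : ∃ n : Nat, pvMaxLen (pvLines text) = (n : Int) :=
      ⟨(pvMaxLen (pvLines text)).toNat, (Int.toNat_of_nonneg hc).symm⟩
    rw [hn, PySem.List.pyRange_zero_natCast, List.map_map]
    have hlen' : line.length ≤ n := by rw [hn] at hlen; exact_mod_cast hlen
    have : ((n : Int) - (line.length : Int)).toNat = n - line.length := by omega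
    rw [this]
    exact pv_row_eq line n hlen'
  · show pvOr (pvLastHit (pvLines text) 0 '2') none = _
    rw [← pv_findLast_eq]
    cases pvFindLast (pvLines text) '2' _ <;> rfl
  · show pvOr (pvLastHit (pvLines text) 0 '3') none = _
    rw [← pv_findLast_eq]
    cases pvFindLast (pvLines text) '3' _ <;> rfl
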